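-- pv_equiv track=rewrite | github.com/afaqmvirk/carleton-leetcode-games-workshop | dna-Mutations/dna.py | find_repeated_one_mutation_sequences
-- ===== SOURCE A (Python) =====
-- from collections import Counter
--
-- def generate_one_mutation_sequences(s):
--     """
--     Generate all possible sequences that are one mutation away from s.
--     """
--     mutations = []
--     bases = {'A', 'C', 'G', 'T'}
--     for i in range(len(s)):
--         for base in bases:
--             if base != s[i]:  # Only mutate if the base is different
--                 mutated = s[:i] + base + s[i+1:]
--                 mutations.append(mutated)
--     return set(mutations)
--
-- def find_repeated_one_mutation_sequences(s, t):
--     """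
--     Find the number of repeated sequences in t that are one mutation away from s.
--     """
--     k = len(s)
--     one_mutation_sequences = generate_one_mutation_sequences(s)
--
--     # Extract all substrings of length k from t
--     substring_counts = Counter(t[i:i+k] for i in range(len(t) - k + 1))
--
--     # Find the sequences that are mutated versions of s and are repeated
--     repeated_count = 0
--     repeated_sequences = []
--
--     for seq, count in substring_counts.items():
--         if seq in one_mutation_sequences and count > 1:
--             repeated_count += 1
--             repeated_sequences.append(seq)
--
--     return repeated_count, repeated_sequences
-- ===== SOURCE B (Python) =====
-- def find_repeated_one_mutation_sequences(s, t):
--     k = len(s)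
--     counts = {}
--     for i in range(len(t) - k + 1):
--         sub = t[i:i+k]
--         counts[sub] = counts.get(sub, 0) + 1
--     repeated = []
--     for seq, c in counts.items():
--         if c > 1:
--             diffs = [j for j in range(k) if seq[j] != s[j]]
--             if len(diffs) == 1 and seq[diffs[0]] in 'ACGT':
--                 repeated.append(seq)
--     return len(repeated), repeated
-- ===== Notes on version B (the rewrite author's own statement) =====
-- stated objective: simpler
-- what changed: B deletes generate_one_mutation_sequences (the ~3k-element set of all one-mutation variants of s) and instead checks each repeated substring directly for exactly one mismatching position against s with the mismatched character in 'ACGT', keeping the same insertion-ordered counting dict so the output order is identical.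
import Mathlib
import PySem

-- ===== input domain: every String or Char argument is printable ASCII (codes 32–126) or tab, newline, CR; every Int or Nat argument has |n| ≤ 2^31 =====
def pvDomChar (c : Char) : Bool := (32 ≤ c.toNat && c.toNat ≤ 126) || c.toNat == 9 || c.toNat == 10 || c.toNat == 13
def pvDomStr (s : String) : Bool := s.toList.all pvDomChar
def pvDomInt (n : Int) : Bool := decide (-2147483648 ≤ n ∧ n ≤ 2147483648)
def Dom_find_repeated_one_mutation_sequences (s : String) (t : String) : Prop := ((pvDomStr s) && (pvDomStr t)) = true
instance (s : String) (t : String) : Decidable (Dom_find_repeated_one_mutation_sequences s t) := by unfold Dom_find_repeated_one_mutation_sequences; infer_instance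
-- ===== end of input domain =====

-- B drops A's generate-all-one-mutation-variants set entirely and instead tests each
-- repeated substring directly for "exactly one mismatch against s, mismatched char in ACGT";
-- objective: simpler (return values only; neither version mutates its arguments).

-- ===== PORT A =====

-- Python's set literal {'A','C','G','T'}; it is consumed only through membership tests
-- (and, in A, an iteration whose output list is immediately collapsed by set(...) and
-- then used only for membership), so the fixed element order below is exact.
def pvBases : List Char := ['A', 'C', 'G', 'T']

-- generate_one_mutation_sequences
def pvGenMut (sl : List Char) : PySem.Set (List Char) :=
  PySem.Set.ofList
    ((PySem.List.pyRange 0 sl.length 1).foldl (fun muts i =>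
      pvBases.foldl (fun muts base =>
        if base != PySem.List.pyGetD sl i ' ' then
          muts ++ [PySem.List.slice sl none (some i) ++ [base] ++ PySem.List.slice sl (some (i + 1)) none]
        else muts) muts) [])

def find_repeated_one_mutation_sequences (s : String) (t : String) : Int × List String :=
  let sl := s.toList
  let tl := t.toList
  -- len(s): the length of the code-point list (= PySem.Str.len s, exact)
  let k : Int := (s.toList.length : Int)
  let one_mutation_sequences := pvGenMut sl
  let substring_counts := PySem.Dict.counter
    ((PySem.List.pyRange 0 ((t.toList.length : Int) - k + 1) 1).map
      (fun i => PySem.List.slice tl (some i) (some (i + k))))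
  let res := substring_counts.items.foldl
    (fun (st : Int × List (List Char)) p =>
      if PySem.Set.contains one_mutation_sequences p.1 && decide (1 < p.2) then
        (st.1 + 1, st.2 ++ [p.1])
      else st) (0, [])
  (res.1, res.2.map String.ofList)

-- ===== PORT B =====

-- B's string literal 'ACGT', as its code points.
def pvACGT : List Char := ['A', 'C', 'G', 'T']

-- B's per-substring test: diffs = [j for j in range(k) if seq[j] != s[j]];
-- len(diffs) == 1 and seq[diffs[0]] in 'ACGT'  (a 1-char `in` on a string is membership).
def pvIsOneMut (sl seq : List Char) : Bool :=
  let diffs := (PySem.List.pyRange 0 sl.length 1).filter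
    (fun j => PySem.List.pyGetD seq j ' ' != PySem.List.pyGetD sl j ' ')
  diffs.length == 1 && pvACGT.contains (PySem.List.pyGetD seq (diffs.getD 0 0) ' ')

def find_repeated_one_mutation_sequences_alt (s : String) (t : String) : Int × List String :=
  let sl := s.toList
  let tl := t.toList
  -- len(s): the length of the code-point list (= PySem.Str.len s, exact)
  let k : Int := (s.toList.length : Int)
  let counts := (PySem.List.pyRange 0 ((t.toList.length : Int) - k + 1) 1).foldl
    (fun d i =>
      -- sub = t[i:i+k], used in both places below
      d.insert (PySem.List.slice tl (some i) (some (i + k)))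
        (d.getD (PySem.List.slice tl (some i) (some (i + k))) 0 + 1))
    (PySem.Dict.empty : PySem.Dict (List Char) Int)
  let repeated := counts.items.foldl
    (fun (acc : List (List Char)) p =>
      if decide (1 < p.2) && pvIsOneMut sl p.1 then acc ++ [p.1] else acc) []
  ((repeated.length : Int), repeated.map String.ofList)

-- ===== PRECONDITION & SPEC =====
def Spec_find_repeated_one_mutation_sequences (s : String) (t : String) (out : Int × List String) : Prop := out = find_repeated_one_mutation_sequences_alt s t
instance (s : String) (t : String) (out : Int × List String) : Decidable (Spec_find_repeated_one_mutation_sequences s t out) := by unfold Spec_find_repeated_one_mutation_sequences; infer_instance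

-- ===== CLAIM (what is proved, stated in full; the proofs are below) =====
def Claim_equal_find_repeated_one_mutation_sequences : Prop := ∀ (s : String) (t : String), Dom_find_repeated_one_mutation_sequences s t → Spec_find_repeated_one_mutation_sequences s t (find_repeated_one_mutation_sequences s t)


-- ===== LEMMAS AND PROOFS =====

-- (range n).filter p is [i] when p holds at i and nowhere else below n.
lemma pv_filter_range_singleton (n i : Nat) (p : Nat → Bool) (hi : i < n)
    (hpi : p i = true) (h : ∀ j, j < n → j ≠ i → p j = false) :
    (List.range n).filter p = [i] := by
  have hn : n = (i + 1) + (n - i - 1) := by omega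
  rw [hn, List.range_add, List.range_succ, List.filter_append, List.filter_append,
    List.filter_map]
  have h1 : (List.range i).filter p = [] := by
    rw [List.filter_eq_nil_iff]
    intro j hj
    simp only [List.mem_range] at hj
    simp [h j (by omega) (by omega)]
  have h2 : (List.range (n - i - 1)).filter (p ∘ (fun x => i + 1 + x)) = [] := by
    rw [List.filter_eq_nil_iff]
    intro j hj
    simp only [List.mem_range] at hj
    simp [Function.comp, h (i + 1 + j) (by omega) (by omega)]
  simp [h1, h2, hpi]

-- A's set of one-mutation variants, characterised: cs is in it iff cs is sl with one
-- position overwritten by a different ACGT base.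
lemma pv_contains_genMut (sl cs : List Char) :
    (PySem.Set.contains (pvGenMut sl) cs = true) ↔
    ∃ i : Nat, i < sl.length ∧ ∃ b ∈ pvBases, b ≠ sl.getD i ' ' ∧ cs = sl.set i b := by
  unfold pvGenMut
  rw [PySem.Set.contains_iff, PySem.Set.mem_ofList]
  have h1 : ∀ (muts : List (List Char)) (i : Int),
      pvBases.foldl (fun muts base =>
        if base != PySem.List.pyGetD sl i ' ' then
          muts ++ [PySem.List.slice sl none (some i) ++ [base] ++ PySem.List.slice sl (some (i + 1)) none]
        else muts) muts
      = muts ++ ((pvBases.filter (fun base => base != PySem.List.pyGetD sl i ' ')).map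
          (fun base => PySem.List.slice sl none (some i) ++ [base] ++ PySem.List.slice sl (some (i + 1)) none)) := by
    intro muts i
    rw [PySem.List.foldl_append_if]
  have h2 : (PySem.List.pyRange 0 (sl.length : Int) 1).foldl (fun muts i =>
        pvBases.foldl (fun muts base =>
          if base != PySem.List.pyGetD sl i ' ' then
            muts ++ [PySem.List.slice sl none (some i) ++ [base] ++ PySem.List.slice sl (some (i + 1)) none]
          else muts) muts) ([] : List (List Char))
      = (PySem.List.pyRange 0 (sl.length : Int) 1).foldl (fun muts i =>
        muts ++ ((pvBases.filter (fun base => base != PySem.List.pyGetD sl i ' ')).map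
          (fun base => PySem.List.slice sl none (some i) ++ [base] ++ PySem.List.slice sl (some (i + 1)) none))) [] :=
    PySem.List.foldl_congr_mem _ _ _ _ (fun muts i _ => h1 muts i)
  rw [h2, PySem.List.foldl_append_eq_flatMap]
  simp only [List.nil_append, List.mem_flatMap, List.mem_map, List.mem_filter,
    PySem.List.mem_pyRange_one]
  constructor
  · rintro ⟨i, ⟨h0, hin⟩, b, ⟨hb, hne⟩, rfl⟩
    lift i to ℕ using h0 with j
    have hj : j < sl.length := by exact_mod_cast hin
    refine ⟨j, hj, b, hb, ?_, ?_⟩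
    · simpa using bne_iff_ne.mp hne
    · rw [PySem.List.slice_to_natCast,
        show ((j : Int) + 1) = (((j + 1 : Nat) : Int)) by push_cast; ring,
        PySem.List.slice_from_natCast, List.set_eq_take_append_cons_drop,
        if_pos (show j < sl.length by omega)]
      simp
  · rintro ⟨i, hi, b, hb, hne, rfl⟩
    refine ⟨(i : Int), ⟨by omega, by exact_mod_cast hi⟩, b, ⟨hb, ?_⟩, ?_⟩
    · simpa using hne
    · rw [PySem.List.slice_to_natCast,
        show ((i : Int) + 1) = (((i + 1 : Nat) : Int)) by push_cast; ring,
        PySem.List.slice_from_natCast, List.set_eq_take_append_cons_drop,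
        if_pos (show i < sl.length by omega)]
      simp

-- B's test, characterised the same way (for an argument of the right length).
lemma pv_isOneMut_iff (sl cs : List Char) (hlen : cs.length = sl.length) :
    pvIsOneMut sl cs = true ↔
    ∃ i : Nat, i < sl.length ∧ ∃ b ∈ pvBases, b ≠ sl.getD i ' ' ∧ cs = sl.set i b := by
  have hAB : pvACGT = pvBases := rfl
  unfold pvIsOneMut
  rw [hAB, PySem.List.pyRange_zero_natCast, List.filter_map]
  simp only [Function.comp_def, PySem.List.pyGetD_natCast]
  set p : Nat → Bool := fun j => cs.getD j ' ' != sl.getD j ' ' with hp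
  constructor
  · intro h
    simp only [Bool.and_eq_true, beq_iff_eq, List.length_map] at h
    obtain ⟨h1, h2⟩ := h
    obtain ⟨j, hj⟩ := List.length_eq_one_iff.mp h1
    have hjmem : j ∈ (List.range sl.length).filter p := by
      rw [hj]; exact List.mem_singleton.mpr rfl
    obtain ⟨hjr, hpj⟩ := List.mem_filter.mp hjmem
    rw [List.mem_range] at hjr
    rw [hj] at h2
    simp only [List.map_cons, List.map_nil, List.getD_cons_zero,
      PySem.List.pyGetD_natCast] at h2
    refine ⟨j, hjr, cs.getD j ' ', by simpa using h2, bne_iff_ne.mp hpj, ?_⟩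
    apply List.ext_getElem (by simp [hlen])
    intro m hm1 hm2
    by_cases hmj : m = j
    · subst hmj
      rw [List.getElem_set_self, List.getD_eq_getElem cs ' ' hm1]
    · rw [List.getElem_set_ne (by omega)]
      have hpm : p m = false := by
        by_cases hpm' : p m = true
        · exfalso
          have : m ∈ (List.range sl.length).filter p :=
            List.mem_filter.mpr ⟨List.mem_range.mpr (by omega), hpm'⟩
          rw [hj, List.mem_singleton] at this
          exact hmj this
        · simpa using hpm'
      have hgd : cs.getD m ' ' = sl.getD m ' ' := by
        have : (cs.getD m ' ' != sl.getD m ' ') = false := hpm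
        exact bne_eq_false_iff_eq.mp this
      rw [List.getD_eq_getElem cs ' ' hm1, List.getD_eq_getElem sl ' ' (by omega)] at hgd
      exact hgd
  · rintro ⟨i, hi, b, hb, hne, rfl⟩
    have hgi : (sl.set i b).getD i ' ' = b := by
      rw [List.getD_eq_getElem _ ' ' (by simpa using hi), List.getElem_set_self]
    have hpi : p i = true := by
      show ((sl.set i b).getD i ' ' != sl.getD i ' ') = true
      rw [hgi]
      exact bne_iff_ne.mpr hne
    have hfil : (List.range sl.length).filter p = [i] := by
      apply pv_filter_range_singleton sl.length i p hi hpi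
      intro j hj hji
      show ((sl.set i b).getD j ' ' != sl.getD j ' ') = false
      have hgd : (sl.set i b).getD j ' ' = sl.getD j ' ' := by
        rw [List.getD_eq_getElem _ ' ' (by simpa using hj), List.getD_eq_getElem sl ' ' hj,
          List.getElem_set_ne (by omega)]
      exact bne_eq_false_iff_eq.mpr hgd
    rw [hfil]
    simp only [List.map_cons, List.map_nil, List.length_cons, List.length_nil,
      List.getD_cons_zero, PySem.List.pyGetD_natCast, hgi]
    simp [hb]

-- On arguments of s's length the two membership tests coincide.
lemma pv_mut_eq (sl cs : List Char) (hlen : cs.length = sl.length) :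
    PySem.Set.contains (pvGenMut sl) cs = pvIsOneMut sl cs :=
  Bool.coe_iff_coe.mp ((pv_contains_genMut sl cs).trans (pv_isOneMut_iff sl cs hlen).symm)

-- A's count-and-collect loop over the items, in closed form.
lemma pv_foldl_pair {α : Type} (l : List (α × Int)) (p : α × Int → Bool) (c0 : Int)
    (a0 : List α) :
    l.foldl (fun st q => if p q then (st.1 + 1, st.2 ++ [q.1]) else st) (c0, a0)
      = (c0 + ((l.filter p).length : Int), a0 ++ (l.filter p).map (·.1)) := by
  induction l generalizing c0 a0 with
  | nil => simp
  | cons x xs ih =>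
    by_cases h : p x = true
    · rw [List.foldl_cons, if_pos h, ih, List.filter_cons_of_pos h]
      refine Prod.ext ?_ ?_
      · simp only [List.length_cons]; push_cast; ring
      · simp
    · rw [List.foldl_cons, if_neg h, ih, List.filter_cons_of_neg (by simp [h])]

-- Every key of the substring counter has s's length.
lemma pv_key_len (sl tl cs : List Char)
    (h : cs ∈ (PySem.List.pyRange 0 ((tl.length : Int) - (sl.length : Int) + 1) 1).map
      (fun i => PySem.List.slice tl (some i) (some (i + (sl.length : Int))))) :
    cs.length = sl.length := by
  obtain ⟨i, hi, rfl⟩ := List.mem_map.mp h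
  rw [PySem.List.mem_pyRange_one] at hi
  obtain ⟨hi0, hi1⟩ := hi
  lift i to ℕ using hi0 with j
  rw [show ((j : Int) + (sl.length : Int)) = (((j + sl.length : Nat) : Int)) by push_cast; ring,
    PySem.List.slice_natCast]
  simp only [List.length_take, List.length_drop]
  omega


-- Final assembly: over any items list whose keys have s's length, the two
-- selection loops produce the same pair.
lemma pv_final (sl : List Char) (E : List (List Char × Int))
    (hkey : ∀ q ∈ E, (q.1).length = sl.length) :
    ((((0 : Int) + ((E.filter (fun q => PySem.Set.contains (pvGenMut sl) q.1 && decide (1 < q.2))).length : Int)),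
        ((([] : List (List Char)) ++ (E.filter (fun q => PySem.Set.contains (pvGenMut sl) q.1 && decide (1 < q.2))).map (fun q => q.1)).map String.ofList)) : Int × List String)
      = ((((([] : List (List Char)) ++ (E.filter (fun q => decide (1 < q.2) && pvIsOneMut sl q.1)).map (fun q => q.1)).length : Int)),
        ((([] : List (List Char)) ++ (E.filter (fun q => decide (1 < q.2) && pvIsOneMut sl q.1)).map (fun q => q.1)).map String.ofList)) := by
  have hfe : E.filter (fun q => PySem.Set.contains (pvGenMut sl) q.1 && decide (1 < q.2))
      = E.filter (fun q => decide (1 < q.2) && pvIsOneMut sl q.1) :=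
    List.filter_congr (fun q hq => by rw [pv_mut_eq sl q.1 (hkey q hq), Bool.and_comm])
  rw [hfe]
  simp

-- The whole computation, stated over the code-point lists.
lemma pv_main (sl tl : List Char) :
    ((((PySem.Dict.counter ((PySem.List.pyRange 0 ((tl.length : Int) - (sl.length : Int) + 1) 1).map
          (fun i => PySem.List.slice tl (some i) (some (i + (sl.length : Int)))))).items.foldl
        (fun (st : Int × List (List Char)) p =>
          if PySem.Set.contains (pvGenMut sl) p.1 && decide (1 < p.2) then
            (st.1 + 1, st.2 ++ [p.1])
          else st) ((0 : Int), ([] : List (List Char)))).1,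
      (((PySem.Dict.counter ((PySem.List.pyRange 0 ((tl.length : Int) - (sl.length : Int) + 1) 1).map
          (fun i => PySem.List.slice tl (some i) (some (i + (sl.length : Int)))))).items.foldl
        (fun (st : Int × List (List Char)) p =>
          if PySem.Set.contains (pvGenMut sl) p.1 && decide (1 < p.2) then
            (st.1 + 1, st.2 ++ [p.1])
          else st) ((0 : Int), ([] : List (List Char)))).2).map String.ofList) : Int × List String)
    = (((((PySem.List.pyRange 0 ((tl.length : Int) - (sl.length : Int) + 1) 1).foldl
          (fun (d : PySem.Dict (List Char) Int) i =>
            d.insert (PySem.List.slice tl (some i) (some (i + (sl.length : Int))))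
              (d.getD (PySem.List.slice tl (some i) (some (i + (sl.length : Int)))) 0 + 1))
          PySem.Dict.empty).items.foldl
        (fun (acc : List (List Char)) p =>
          if decide (1 < p.2) && pvIsOneMut sl p.1 then acc ++ [p.1] else acc) []).length : Int),
      (((PySem.List.pyRange 0 ((tl.length : Int) - (sl.length : Int) + 1) 1).foldl
          (fun (d : PySem.Dict (List Char) Int) i =>
            d.insert (PySem.List.slice tl (some i) (some (i + (sl.length : Int))))
              (d.getD (PySem.List.slice tl (some i) (some (i + (sl.length : Int)))) 0 + 1))
          PySem.Dict.empty).items.foldl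
        (fun (acc : List (List Char)) p =>
          if decide (1 < p.2) && pvIsOneMut sl p.1 then acc ++ [p.1] else acc) []).map String.ofList) := by
  have hcnt : (PySem.List.pyRange 0 ((tl.length : Int) - (sl.length : Int) + 1) 1).foldl
        (fun (d : PySem.Dict (List Char) Int) i =>
          d.insert (PySem.List.slice tl (some i) (some (i + (sl.length : Int))))
            (d.getD (PySem.List.slice tl (some i) (some (i + (sl.length : Int)))) 0 + 1))
        PySem.Dict.empty
      = PySem.Dict.counter ((PySem.List.pyRange 0 ((tl.length : Int) - (sl.length : Int) + 1) 1).map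
          (fun i => PySem.List.slice tl (some i) (some (i + (sl.length : Int))))) := by
    rw [← PySem.Dict.foldl_insert_getD_add_one_eq_counter, List.foldl_map]
  rw [hcnt, pv_foldl_pair, PySem.List.foldl_append_if]
  apply pv_final
  intro q hq
  rw [PySem.Dict.items_counter] at hq
  obtain ⟨k, hk, rfl⟩ := List.mem_map.mp hq
  have hk' := hk
  rw [PySem.Set.mem_ofList] at hk'
  exact pv_key_len sl tl k hk'

-- ===== VERDICT (by name: the statement is the Claim_ definition above) =====
theorem find_repeated_one_mutation_sequences_spec : Claim_equal_find_repeated_one_mutation_sequences := by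
  unfold Claim_equal_find_repeated_one_mutation_sequences
  intro s t _
  unfold Spec_find_repeated_one_mutation_sequences
  simp only [find_repeated_one_mutation_sequences, find_repeated_one_mutation_sequences_alt]
  exact pv_main s.toList t.toList
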